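-- pv_equiv track=rewrite | github.com/Baucettiii/Twee2Docx | twee2docx.py | _is_swap_valid
-- ===== SOURCE A (Python) =====
-- def _is_swap_valid(id_map, links, node1, node2, min_dist):
--     """
--     Verifica se lo scambio tra due nodi non crea nuove violazioni di distanza minima.
--     """
--     # Crea una copia della mappa con lo scambio
--     test_map = id_map.copy()
--     test_map[node1], test_map[node2] = test_map[node2], test_map[node1]
--
--     # Verifica tutti i link che coinvolgono i due nodi
--     nodes_to_check = [node1, node2]
--
--     for node in nodes_to_check:
--         # Trova tutti i vicini di questo nodo
--         neighbors = set()
--         for link in links: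
--             if link['source'] == node:
--                 neighbors.add(link['dest'])
--             elif link['dest'] == node:
--                 neighbors.add(link['source'])
--
--         # Verifica che tutti i vicini rispettino la distanza minima
--         for neighbor in neighbors:
--             if neighbor in test_map:
--                 distance = abs(test_map[node] - test_map[neighbor])
--                 if distance < min_dist:
--                     return False
--
--     return True
-- ===== SOURCE B (Python) =====
-- def _is_swap_valid(id_map, links, node1, node2, min_dist):
--     """Single pass over links, checking each relevant (node, neighbor) pair inline
--     instead of building a neighbor set per swapped node."""
--     test_map = id_map.copy()
--     test_map[node1], test_map[node2] = test_map[node2], test_map[node1]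
--
--     def violates(node, neighbor):
--         return (neighbor in test_map
--                 and abs(test_map[node] - test_map[neighbor]) < min_dist)
--
--     for link in links:
--         s, d = link['source'], link['dest']
--         if s == node1:
--             if violates(node1, d):
--                 return False
--         elif d == node1:
--             if violates(node1, s):
--                 return False
--         if s == node2:
--             if violates(node2, d):
--                 return False
--         elif d == node2:
--             if violates(node2, s):
--                 return False
--     return True
-- ===== Notes on version B (the rewrite author's own statement) =====
-- stated objective: alternative
-- what changed: B makes a single pass over links and checks each relevant (node, neighbor) pair inline with early exit, instead of A's two per-node scans that each materialize a neighbor set before checking.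
import Mathlib
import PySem

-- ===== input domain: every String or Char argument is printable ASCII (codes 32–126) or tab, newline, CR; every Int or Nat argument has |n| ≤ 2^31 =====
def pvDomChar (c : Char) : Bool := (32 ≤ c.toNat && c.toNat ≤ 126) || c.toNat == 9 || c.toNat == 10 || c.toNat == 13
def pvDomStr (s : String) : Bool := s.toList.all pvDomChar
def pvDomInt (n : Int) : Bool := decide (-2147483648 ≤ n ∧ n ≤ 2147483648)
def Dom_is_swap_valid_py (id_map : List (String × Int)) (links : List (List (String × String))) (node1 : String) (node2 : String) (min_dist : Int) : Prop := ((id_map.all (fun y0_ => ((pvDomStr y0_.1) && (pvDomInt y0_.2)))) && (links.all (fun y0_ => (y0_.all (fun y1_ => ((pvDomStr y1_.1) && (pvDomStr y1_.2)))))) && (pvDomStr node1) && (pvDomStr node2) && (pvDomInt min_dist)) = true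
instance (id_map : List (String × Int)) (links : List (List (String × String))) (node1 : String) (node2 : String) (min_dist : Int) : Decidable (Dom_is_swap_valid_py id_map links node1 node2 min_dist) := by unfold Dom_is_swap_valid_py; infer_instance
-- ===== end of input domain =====

-- ===== PORT A =====
-- B changes decomposition only: one inline pass over links instead of A's two per-node
-- neighbor-set scans; return value proved equal (A mutates no argument the caller keeps:
-- it swaps inside a fresh copy of id_map).

-- link['source'] / link['dest'] and test_map[node]: keys present under Pre_, so getD's
-- default is never read there (exact on Pre_).
def aViolates (tm : PySem.Dict String Int) (min_dist : Int) (node neighbor : String) : Bool :=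
  tm.contains neighbor && decide (|tm.getD node 0 - tm.getD neighbor 0| < min_dist)

-- inner 'for link in links' building the neighbors set of `node`
def aNeighbors (links : List (List (String × String))) (node : String) : PySem.Set String :=
  links.foldl (fun (nbs : PySem.Set String) link =>
    let d := PySem.Dict.ofList link
    if d.getD "source" "" == node then PySem.Set.add nbs (d.getD "dest" "")
    else if d.getD "dest" "" == node then PySem.Set.add nbs (d.getD "source" "")
    else nbs) PySem.Set.empty

-- 'for neighbor in neighbors: … return False' — order-independent any over the set
def aNodeBad (tm : PySem.Dict String Int) (links : List (List (String × String)))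
    (min_dist : Int) (node : String) : Bool :=
  (aNeighbors links node).any (fun nb => aViolates tm min_dist node nb)

def is_swap_valid_py (id_map : List (String × Int)) (links : List (List (String × String))) (node1 : String) (node2 : String) (min_dist : Int) : Bool :=
  let tm0 := PySem.Dict.ofList id_map
  let v2 := tm0.getD node2 0
  let v1 := tm0.getD node1 0
  let tm := (tm0.insert node1 v2).insert node2 v1
  -- for node in [node1, node2]:
  if aNodeBad tm links min_dist node1 then false
  else if aNodeBad tm links min_dist node2 then false
  else true

-- ===== PORT B =====
def bViolates (tm : PySem.Dict String Int) (min_dist : Int) (node neighbor : String) : Bool :=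
  tm.contains neighbor && decide (|tm.getD node 0 - tm.getD neighbor 0| < min_dist)

-- per-link inline check against one swapped node (source before dest, as in Source B)
def bLinkBad (tm : PySem.Dict String Int) (min_dist : Int) (node : String)
    (s d : String) : Bool :=
  if s == node then bViolates tm min_dist node d
  else if d == node then bViolates tm min_dist node s
  else false

-- the single early-exit loop over links
def bLoop (tm : PySem.Dict String Int) (min_dist : Int) (node1 node2 : String) :
    List (List (String × String)) → Bool
  | [] => true
  | link :: rest =>
    let dd := PySem.Dict.ofList link
    let s := dd.getD "source" ""
    let d := dd.getD "dest" ""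
    if bLinkBad tm min_dist node1 s d then false
    else if bLinkBad tm min_dist node2 s d then false
    else bLoop tm min_dist node1 node2 rest

def is_swap_valid_py_alt (id_map : List (String × Int)) (links : List (List (String × String))) (node1 : String) (node2 : String) (min_dist : Int) : Bool :=
  let tm0 := PySem.Dict.ofList id_map
  let v2 := tm0.getD node2 0
  let v1 := tm0.getD node1 0
  let tm := (tm0.insert node1 v2).insert node2 v1
  bLoop tm min_dist node1 node2 links

-- ===== PRECONDITION & SPEC =====
-- Exactly where the Python A returns normally: node1 and node2 are keys of id_map and
-- every link carries both the 'source' and the 'dest' key (else KeyError).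
def Pre_is_swap_valid_py (id_map : List (String × Int)) (links : List (List (String × String))) (node1 : String) (node2 : String) (min_dist : Int) : Prop :=
  node1 ∈ id_map.map Prod.fst ∧ node2 ∈ id_map.map Prod.fst ∧
  ∀ link ∈ links, "source" ∈ link.map Prod.fst ∧ "dest" ∈ link.map Prod.fst
instance (id_map : List (String × Int)) (links : List (List (String × String))) (node1 : String) (node2 : String) (min_dist : Int) : Decidable (Pre_is_swap_valid_py id_map links node1 node2 min_dist) := by unfold Pre_is_swap_valid_py; infer_instance

def pvWitness_is_swap_valid_py : (List (String × Int)) × (List (List (String × String))) × String × String × Int :=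
  ([("a", 0), ("b", 5)], [[("source", "a"), ("dest", "b")]], "a", "b", 1)

def Spec_is_swap_valid_py (id_map : List (String × Int)) (links : List (List (String × String))) (node1 : String) (node2 : String) (min_dist : Int) (out : Bool) : Prop := out = is_swap_valid_py_alt id_map links node1 node2 min_dist
instance (id_map : List (String × Int)) (links : List (List (String × String))) (node1 : String) (node2 : String) (min_dist : Int) (out : Bool) : Decidable (Spec_is_swap_valid_py id_map links node1 node2 min_dist out) := by unfold Spec_is_swap_valid_py; infer_instance

-- ===== CLAIM (what is proved, stated in full; the proofs are below) =====
def Claim_equal_is_swap_valid_py : Prop := ∀ (id_map : List (String × Int)) (links : List (List (String × String))) (node1 : String) (node2 : String) (min_dist : Int), Dom_is_swap_valid_py id_map links node1 node2 min_dist → Pre_is_swap_valid_py id_map links node1 node2 min_dist → Spec_is_swap_valid_py id_map links node1 node2 min_dist (is_swap_valid_py id_map links node1 node2 min_dist)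

-- ===== LEMMAS AND PROOFS =====
-- the per-link contribution A's neighbor set collects for `node`
def linkBad (tm : PySem.Dict String Int) (min_dist : Int) (node : String)
    (link : List (String × String)) : Bool :=
  bLinkBad tm min_dist node (PySem.Dict.getD (PySem.Dict.ofList link) "source" "")
    (PySem.Dict.getD (PySem.Dict.ofList link) "dest" "")

theorem any_add (s : PySem.Set String) (x : String) (p : String → Bool) :
    (PySem.Set.add s x).any p = (s.any p || p x) := by
  by_cases hx : x ∈ s
  · rw [PySem.Set.add_of_mem hx]
    rcases hp : p x with _ | _
    · simp
    · simp [List.any_eq_true]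
      exact ⟨x, hx, hp⟩
  · rw [PySem.Set.add_of_not_mem hx]; simp

theorem aNodeBad_eq_any (tm : PySem.Dict String Int) (links : List (List (String × String)))
    (min_dist : Int) (node : String) :
    aNodeBad tm links min_dist node = links.any (linkBad tm min_dist node) := by
  unfold aNodeBad aNeighbors
  suffices h : ∀ (s : PySem.Set String),
      (links.foldl (fun (nbs : PySem.Set String) link =>
        let d := PySem.Dict.ofList link
        if d.getD "source" "" == node then PySem.Set.add nbs (d.getD "dest" "")
        else if d.getD "dest" "" == node then PySem.Set.add nbs (d.getD "source" "")
        else nbs) s).any (fun nb => aViolates tm min_dist node nb)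
      = (s.any (fun nb => aViolates tm min_dist node nb) || links.any (linkBad tm min_dist node)) by
    simpa using h PySem.Set.empty
  induction links with
  | nil => intro s; simp
  | cons l ls ih =>
    intro s
    simp only [List.foldl_cons, List.any_cons]
    by_cases h1 : PySem.Dict.getD (PySem.Dict.ofList l) "source" "" == node
    · rw [if_pos h1, ih _, any_add]
      simp only [linkBad, bLinkBad, bViolates, aViolates, h1, if_pos]
      rw [Bool.or_assoc]
    · rw [if_neg (by simpa using h1)]
      by_cases h2 : PySem.Dict.getD (PySem.Dict.ofList l) "dest" "" == node
      · rw [if_pos h2, ih _, any_add]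
        simp only [linkBad, bLinkBad, bViolates, aViolates, h2, if_pos,
          if_neg (by simpa using h1 : ¬ (PySem.Dict.getD (PySem.Dict.ofList l) "source" "" == node) = true)]
        rw [Bool.or_assoc]
      · rw [if_neg (by simpa using h2), ih _]
        simp only [linkBad, bLinkBad,
          if_neg (by simpa using h1 : ¬ (PySem.Dict.getD (PySem.Dict.ofList l) "source" "" == node) = true),
          if_neg (by simpa using h2 : ¬ (PySem.Dict.getD (PySem.Dict.ofList l) "dest" "" == node) = true)]
        simp

theorem bLoop_eq_any (tm : PySem.Dict String Int) (min_dist : Int) (node1 node2 : String)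
    (links : List (List (String × String))) :
    bLoop tm min_dist node1 node2 links
      = !(links.any (fun l => linkBad tm min_dist node1 l || linkBad tm min_dist node2 l)) := by
  induction links with
  | nil => rfl
  | cons l ls ih =>
    simp only [bLoop, List.any_cons, linkBad]
    by_cases h1 : bLinkBad tm min_dist node1 (PySem.Dict.getD (PySem.Dict.ofList l) "source" "")
        (PySem.Dict.getD (PySem.Dict.ofList l) "dest" "") = true
    · simp [h1]
    · by_cases h2 : bLinkBad tm min_dist node2 (PySem.Dict.getD (PySem.Dict.ofList l) "source" "")
          (PySem.Dict.getD (PySem.Dict.ofList l) "dest" "") = true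
      · simp [h1, h2]
      · simp only [Bool.not_eq_true] at h1 h2
        simp [h1, h2, ih, linkBad]

theorem any_or_split {α : Type} (l : List α) (p q : α → Bool) :
    (l.any fun a => p a || q a) = (l.any p || l.any q) := by
  induction l with
  | nil => rfl
  | cons a l ih => simp only [List.any_cons, ih]; cases p a <;> cases q a <;> simp

-- ===== VERDICT (by name: the statement is the Claim_ definition above) =====
theorem is_swap_valid_py_spec : Claim_equal_is_swap_valid_py := by
  intro id_map links node1 node2 min_dist _ _
  unfold Spec_is_swap_valid_py
  have hA : is_swap_valid_py id_map links node1 node2 min_dist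
      = (if aNodeBad (((PySem.Dict.ofList id_map).insert node1
          ((PySem.Dict.ofList id_map).getD node2 0)).insert node2
          ((PySem.Dict.ofList id_map).getD node1 0)) links min_dist node1 then false
        else if aNodeBad (((PySem.Dict.ofList id_map).insert node1
          ((PySem.Dict.ofList id_map).getD node2 0)).insert node2
          ((PySem.Dict.ofList id_map).getD node1 0)) links min_dist node2 then false
        else true) := rfl
  have hB : is_swap_valid_py_alt id_map links node1 node2 min_dist
      = bLoop (((PySem.Dict.ofList id_map).insert node1
          ((PySem.Dict.ofList id_map).getD node2 0)).insert node2
          ((PySem.Dict.ofList id_map).getD node1 0)) min_dist node1 node2 links := rfl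
  rw [hA, hB, bLoop_eq_any, aNodeBad_eq_any, aNodeBad_eq_any, any_or_split]
  cases h1 : links.any (linkBad (((PySem.Dict.ofList id_map).insert node1
      ((PySem.Dict.ofList id_map).getD node2 0)).insert node2
      ((PySem.Dict.ofList id_map).getD node1 0)) min_dist node1) <;>
    cases h2 : links.any (linkBad (((PySem.Dict.ofList id_map).insert node1
      ((PySem.Dict.ofList id_map).getD node2 0)).insert node2
      ((PySem.Dict.ofList id_map).getD node1 0)) min_dist node2) <;> simp
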